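-- pv_equiv track=rewrite | github.com/cybera/DataScienceTools | scripts/miscellaneous.py | comboFinder
-- ===== SOURCE A (Python) =====
-- from itertools import combinations
--
-- def comboFinder(sets, appear_once = False):
--     '''
--     Function which takes a dictionary of sets which contain the set intersection
--     of various combinations of those features. For example, if we have three sets
--     S1, S2 and S3 as input, this will return the following combinations of overlap,
--     as well as the "leftovers" unique to each set. Mathematically speaking:
--
--     S1 ∩ S2 ∩ S3
--     S1 ∩ S2
--     S2 ∩ S3
--     S1 ∩ S3
--
--     S1 - (the above intersections)
--     S2 - (the above intersections)
--     S3 - (the above intersection)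
--
--     Useful for understanding how different sets are related.
--
--     INPUT:
--
--     sets  -->  Dictionary of sets
--     appear_once --> Flag to filter additional overlap. If true, each element will only appear once
--                     accros all output sets. If False, elements of each list may appear in more than
--                     one place.
--
--     RETURNS:
--
--         dictionary, keyed by tuples of the keys of sets with the intersection between those sets, filtered
--         if flag is present
--
--     '''
--     combo_uniques = {}
--     temp = {}
--     visited = []
--     for key in sets:
--         temp[(key,)] = sets[key]
--
--     for i in range(len(sets) , 1, -1):
--         comb = list(combinations(sets, i))
--         mini_set = set()
--
--         for j, tup in enumerate(comb):
--             for i, key in enumerate(tup):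
--                 if i == 0:
--                     mini_set = sets[key]
--                 else:
--                     mini_set =  (mini_set & sets[key])
--              # remove overlap
--             if appear_once:
--                 for key in combo_uniques:
--                     mini_set = mini_set - combo_uniques[key]
--
--             combo_uniques[tup] = mini_set
--
--
--     for tup in combo_uniques.keys():
--         for key in tup:
--             temp[(key,)] = temp[(key,)] - combo_uniques[tup]
--
--
--
--     combo_uniques.update(temp)
--     return combo_uniques
-- ===== SOURCE B (Python) =====
-- from itertools import combinations
--
-- def comboFinder(sets, appear_once=False):
--     keys = list(sets)
--     # memoized intersections: inter[tup] is built from inter[tup[:-1]] in one set op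
--     inter = {(k,): sets[k] for k in keys}
--     for size in range(2, len(keys) + 1):
--         for tup in combinations(keys, size):
--             inter[tup] = inter[tup[:-1]] & sets[tup[-1]]
--     result = {}
--     seen = set()
--     for size in range(len(keys), 1, -1):
--         for tup in combinations(keys, size):
--             val = inter[tup]
--             if appear_once:
--                 val = val - seen
--                 seen = seen | val
--             result[tup] = val
--     # leftovers: subtract, per key, the union of all combo values containing it
--     for k in keys:
--         drop = set()
--         for tup, val in result.items():
--             if k in tup:
--                 drop = drop | val
--         result[(k,)] = sets[k] - drop
--     return result
-- ===== Notes on version B (the rewrite author's own statement) =====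
-- stated objective: alternative
-- what changed: Each size-k intersection is built in one set operation from its memoized size-(k-1) prefix instead of re-intersecting k sets from scratch; the appear_once filter subtracts a single running union instead of looping over all previously stored combos; leftovers are computed per key from one union of the combo values containing that key instead of repeatedly updating the temp dict.
import Mathlib
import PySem

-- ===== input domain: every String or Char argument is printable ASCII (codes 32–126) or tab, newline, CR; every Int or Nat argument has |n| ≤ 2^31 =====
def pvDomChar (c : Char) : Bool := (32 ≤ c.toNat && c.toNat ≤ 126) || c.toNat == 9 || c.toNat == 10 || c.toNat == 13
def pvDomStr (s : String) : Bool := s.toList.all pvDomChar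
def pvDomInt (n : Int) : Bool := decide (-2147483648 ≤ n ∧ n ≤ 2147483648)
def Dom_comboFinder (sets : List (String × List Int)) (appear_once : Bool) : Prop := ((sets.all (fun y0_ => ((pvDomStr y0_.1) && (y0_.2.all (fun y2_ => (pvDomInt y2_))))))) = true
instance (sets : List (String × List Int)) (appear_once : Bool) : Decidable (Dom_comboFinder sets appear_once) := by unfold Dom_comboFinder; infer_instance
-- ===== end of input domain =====

-- B re-implements A differently: intersections are built incrementally from memoized
-- size-(k-1) prefixes and the appear_once pass keeps one running union; the proof shows
-- the two return identical dictionaries on every input.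

-- shared helper: itertools.combinations(l, k) in lexicographic index order (used by both ports)
def pyCombos {α : Type} : List α → Nat → List (List α)
  | _, 0 => [[]]
  | [], _ + 1 => []
  | x :: xs, k + 1 => ((pyCombos xs k).map (fun t => x :: t)) ++ pyCombos xs (k + 1)

-- ===== PORT A =====
def comboFinder (sets : List (String × List Int)) (appear_once : Bool) : List (List String × List Int) :=
  let d : PySem.Dict String (List Int) :=
    PySem.Dict.ofList (sets.map (fun p => (p.1, PySem.Set.ofList p.2)))
  -- for key in sets: temp[(key,)] = sets[key]
  let temp : PySem.Dict (List String) (List Int) :=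
    d.keys.foldl (fun t key => t.insert [key] (d.getD key [])) PySem.Dict.empty
  -- for i in range(len(sets), 1, -1): recompute every intersection from scratch
  let combo_uniques : PySem.Dict (List String) (List Int) :=
    (PySem.List.pyRange (d.size : Int) 1 (-1)).foldl (fun cu i =>
      let comb := pyCombos d.keys i.toNat
      ((PySem.List.enumerate comb).foldl
        (fun (st : PySem.Set Int × PySem.Dict (List String) (List Int)) jtup =>
          let mini0 :=
            (PySem.List.enumerate jtup.2).foldl
              (fun mini ik =>
                if ik.1 == 0 then d.getD ik.2 []
                else PySem.Set.inter mini (d.getD ik.2 [])) st.1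
          let mini1 :=
            if appear_once then
              st.2.keys.foldl (fun m key => PySem.Set.diff m (st.2.getD key [])) mini0
            else mini0
          (mini1, st.2.insert jtup.2 mini1))
        ((PySem.Set.empty : PySem.Set Int), cu)).2)
      PySem.Dict.empty
  -- for tup in combo_uniques.keys(): for key in tup: temp[(key,)] -= combo_uniques[tup]
  let temp2 :=
    combo_uniques.keys.foldl (fun t tup =>
      tup.foldl (fun t key =>
        t.insert [key] (PySem.Set.diff (t.getD [key] []) (combo_uniques.getD tup []))) t)
      temp
  (combo_uniques.update temp2.items).items

-- ===== PORT B =====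
def comboFinder_alt (sets : List (String × List Int)) (appear_once : Bool) : List (List String × List Int) :=
  let d : PySem.Dict String (List Int) :=
    PySem.Dict.ofList (sets.map (fun p => (p.1, PySem.Set.ofList p.2)))
  let keys := d.keys
  -- inter = {(k,): sets[k] for k in keys}; then build each tup from its prefix in ONE op
  let inter : PySem.Dict (List String) (List Int) :=
    (PySem.List.pyRange 2 (PySem.List.len keys + 1) 1).foldl (fun m size =>
      (pyCombos keys size.toNat).foldl (fun m tup =>
        m.insert tup (PySem.Set.inter
          (m.getD (PySem.List.slice tup none (some (-1))) [])
          (d.getD (PySem.List.pyGetD tup (-1) "") []))) m)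
      (keys.foldl (fun m k => m.insert [k] (d.getD k [])) PySem.Dict.empty)
  -- result loop, sizes descending; appear_once via one running union 'seen'
  let rs : PySem.Dict (List String) (List Int) × PySem.Set Int :=
    (PySem.List.pyRange (PySem.List.len keys) 1 (-1)).foldl (fun rs size =>
      (pyCombos keys size.toNat).foldl (fun rs tup =>
        let val0 := inter.getD tup []
        if appear_once then
          let val := PySem.Set.diff val0 rs.2
          (rs.1.insert tup val, PySem.Set.union rs.2 val)
        else
          (rs.1.insert tup val0, rs.2)) rs)
      (PySem.Dict.empty, (PySem.Set.empty : PySem.Set Int))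
  -- leftovers: subtract, per key, the union of all combo values containing it
  let result :=
    keys.foldl (fun r k =>
      let drop := r.items.foldl (fun dr p =>
        if k ∈ p.1 then PySem.Set.union dr p.2 else dr) (PySem.Set.empty : PySem.Set Int)
      r.insert [k] (PySem.Set.diff (d.getD k []) drop)) rs.1
  result.items

-- ===== PRECONDITION & SPEC =====
def Spec_comboFinder (sets : List (String × List Int)) (appear_once : Bool) (out : List (List String × List Int)) : Prop := out = comboFinder_alt sets appear_once
instance (sets : List (String × List Int)) (appear_once : Bool) (out : List (List String × List Int)) : Decidable (Spec_comboFinder sets appear_once out) := by unfold Spec_comboFinder; infer_instance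

-- ===== CLAIM (what is proved, stated in full; the proofs are below) =====
def Claim_equal_comboFinder : Prop := ∀ (sets : List (String × List Int)) (appear_once : Bool), Dom_comboFinder sets appear_once → Spec_comboFinder sets appear_once (comboFinder sets appear_once)

-- ===== LEMMAS AND PROOFS =====

-- proof-side abbreviations (structured views of the two let-chains above)
def pvS (d : PySem.Dict String (List Int)) (k : String) : List Int := d.getD k []

def pvIv (d : PySem.Dict String (List Int)) : List String → List Int
  | [] => []
  | k :: r => r.foldl (fun m k' => PySem.Set.inter m (pvS d k')) (pvS d k)

def pvT (d : PySem.Dict String (List Int)) : List (List String) :=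
  (PySem.List.pyRange (d.keys.length : Int) 1 (-1)).flatMap (fun i => pyCombos d.keys i.toNat)

def pvAfter (ao : Bool) (cu : PySem.Dict (List String) (List Int)) (v : List Int) : List Int :=
  if ao then cu.keys.foldl (fun m key => PySem.Set.diff m (cu.getD key [])) v else v

def pvStepA (d : PySem.Dict String (List Int)) (ao : Bool)
    (cu : PySem.Dict (List String) (List Int)) (tup : List String) :
    PySem.Dict (List String) (List Int) :=
  cu.insert tup (pvAfter ao cu (pvIv d tup))

def pvCU (d : PySem.Dict String (List Int)) (ao : Bool) : PySem.Dict (List String) (List Int) :=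
  (pvT d).foldl (pvStepA d ao) PySem.Dict.empty

def pvTemp0 (d : PySem.Dict String (List Int)) : PySem.Dict (List String) (List Int) :=
  d.keys.foldl (fun m k => m.insert [k] (d.getD k [])) PySem.Dict.empty

def pvIns (d : PySem.Dict String (List Int)) (m : PySem.Dict (List String) (List Int))
    (tup : List String) : PySem.Dict (List String) (List Int) :=
  m.insert tup (PySem.Set.inter
    (m.getD (PySem.List.slice tup none (some (-1))) [])
    (d.getD (PySem.List.pyGetD tup (-1) "") []))

def pvInterUpTo (d : PySem.Dict String (List Int)) (s : Nat) : PySem.Dict (List String) (List Int) :=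
  (PySem.List.pyRange 2 ((s : Int) + 1) 1).foldl (fun m size =>
    (pyCombos d.keys size.toNat).foldl (pvIns d) m)
    (pvTemp0 d)

def pvInter (d : PySem.Dict String (List Int)) : PySem.Dict (List String) (List Int) :=
  pvInterUpTo d d.keys.length

def pvStepB (d : PySem.Dict String (List Int)) (ao : Bool)
    (rs : PySem.Dict (List String) (List Int) × PySem.Set Int) (tup : List String) :
    PySem.Dict (List String) (List Int) × PySem.Set Int :=
  let val0 := (pvInter d).getD tup []
  if ao then
    let val := PySem.Set.diff val0 rs.2
    (rs.1.insert tup val, PySem.Set.union rs.2 val)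
  else
    (rs.1.insert tup val0, rs.2)

def pvRS (d : PySem.Dict String (List Int)) (ao : Bool) :
    PySem.Dict (List String) (List Int) × PySem.Set Int :=
  (pvT d).foldl (pvStepB d ao) (PySem.Dict.empty, (PySem.Set.empty : PySem.Set Int))

-- ---------- pyCombos facts ----------
theorem pyCombos_sublist {α : Type} : ∀ (l : List α) (k : Nat) (t : List α),
    t ∈ pyCombos l k → t.Sublist l := by
  intro l
  induction l with
  | nil =>
    intro k t ht
    cases k with
    | zero => simp [pyCombos] at ht; simp [ht]
    | succ k => simp [pyCombos] at ht
  | cons x xs ih =>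
    intro k t ht
    cases k with
    | zero => simp [pyCombos] at ht; simp [ht]
    | succ k =>
      simp [pyCombos] at ht
      rcases ht with ⟨t', ht', rfl⟩ | ht
      · exact (ih k t' ht').cons₂ x
      · exact (ih (k+1) t ht).cons x

theorem pyCombos_length {α : Type} : ∀ (l : List α) (k : Nat) (t : List α),
    t ∈ pyCombos l k → t.length = k := by
  intro l
  induction l with
  | nil =>
    intro k t ht
    cases k with
    | zero => simp [pyCombos] at ht; simp [ht]
    | succ k => simp [pyCombos] at ht
  | cons x xs ih =>
    intro k t ht
    cases k with
    | zero => simp [pyCombos] at ht; simp [ht]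
    | succ k =>
      simp [pyCombos] at ht
      rcases ht with ⟨t', ht', rfl⟩ | ht
      · simp [ih k t' ht']
      · exact ih (k+1) t ht

theorem pyCombos_nodup {α : Type} : ∀ (l : List α) (k : Nat), l.Nodup → (pyCombos l k).Nodup := by
  intro l
  induction l with
  | nil =>
    intro k _
    cases k with
    | zero => simp [pyCombos]
    | succ k => simp [pyCombos]
  | cons x xs ih =>
    intro k hl
    cases k with
    | zero => simp [pyCombos]
    | succ k =>
      have hx : x ∉ xs := (List.nodup_cons.mp hl).1
      have hxs : xs.Nodup := (List.nodup_cons.mp hl).2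
      refine List.Nodup.append ?_ (ih (k+1) hxs) ?_
      · exact (ih k hxs).map (fun a b h => by simpa using h)
      · intro t htm htr
        simp at htm
        rcases htm with ⟨t', _, rfl⟩
        exact hx ((pyCombos_sublist xs (k+1) _ htr).subset (List.mem_cons_self ..))

theorem pyCombos_one {α : Type} : ∀ (l : List α), pyCombos l 1 = l.map (fun x => [x]) := by
  intro l
  induction l with
  | nil => simp [pyCombos]
  | cons x xs ih => simp [pyCombos, ih]

theorem mem_pyCombos_cons {α : Type} (x : α) (l : List α) (k : Nat) (t : List α)
    (ht : t ∈ pyCombos l k) : t ∈ pyCombos (x :: l) k := by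
  cases k with
  | zero => simpa [pyCombos] using ht
  | succ k => simp [pyCombos]; right; exact ht

theorem pyCombos_dropLast {α : Type} : ∀ (l : List α) (k : Nat) (t : List α),
    t ∈ pyCombos l (k + 1) → t.dropLast ∈ pyCombos l k := by
  intro l
  induction l with
  | nil => intro k t ht; simp [pyCombos] at ht
  | cons x xs ih =>
    intro k t ht
    simp [pyCombos] at ht
    rcases ht with ⟨t', ht', rfl⟩ | ht
    · cases k with
      | zero =>
        have : t' = [] := by simpa [pyCombos] using ht'
        simp [this, pyCombos]
      | succ k' =>
        have hne : t' ≠ [] := by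
          have := pyCombos_length xs (k'+1) t' ht'
          intro h; simp [h] at this
        rw [List.dropLast_cons_of_ne_nil hne]
        simp [pyCombos]
        left
        exact ih k' t' ht'
    · exact mem_pyCombos_cons x xs k t.dropLast (ih k t ht)

-- ---------- generic set/fold lemmas ----------
theorem foldl_diff_eq_filter {β : Type} (g : β → List Int) :
    ∀ (ts : List β) (v : List Int),
    ts.foldl (fun m t => PySem.Set.diff m (g t)) v
      = v.filter (fun x => ts.all (fun t => !(g t).contains x)) := by
  intro ts
  induction ts with
  | nil => intro v; simp
  | cons t ts ih =>
    intro v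
    rw [List.foldl_cons, ih]
    rw [show PySem.Set.diff v (g t) = v.filter (fun x => !(g t).contains x) from rfl,
      List.filter_filter]
    apply List.filter_congr
    intro x _
    simp [Bool.and_comm]

theorem chain_diff_eq_diff {β : Type} (g : β → List Int) (ts : List β) (v s : List Int)
    (h : ∀ x : Int, x ∈ s ↔ ∃ t ∈ ts, x ∈ g t) :
    ts.foldl (fun m t => PySem.Set.diff m (g t)) v = PySem.Set.diff v s := by
  rw [foldl_diff_eq_filter]
  rw [show PySem.Set.diff v s = v.filter (fun x => !s.contains x) from rfl]
  apply List.filter_congr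
  intro x _
  by_cases hx : x ∈ s
  · obtain ⟨t, htt, hxg⟩ := (h x).mp hx
    simp [hx]
    exact ⟨t, htt, hxg⟩
  · have hall : ∀ t ∈ ts, x ∉ g t := fun t ht hg => hx ((h x).mpr ⟨t, ht, hg⟩)
    simp [hx, List.all_eq_true]
    exact hall

theorem diff_congr_mem (v s s' : List Int) (h : ∀ x : Int, x ∈ s ↔ x ∈ s') :
    PySem.Set.diff v s = PySem.Set.diff v s' := by
  rw [show PySem.Set.diff v s = v.filter (fun x => !s.contains x) from rfl,
    show PySem.Set.diff v s' = v.filter (fun x => !s'.contains x) from rfl]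
  apply List.filter_congr
  intro x _
  by_cases hx : x ∈ s
  · simp [hx, (h x).mp hx]
  · have hx' : x ∉ s' := fun hs' => hx ((h x).mpr hs')
    simp [hx, hx']

theorem mem_foldl_union_if (k : String) :
    ∀ (ps : List (List String × List Int)) (dr : List Int) (x : Int),
    (x ∈ ps.foldl (fun dr p => if k ∈ p.1 then PySem.Set.union dr p.2 else dr) dr
      ↔ x ∈ dr ∨ ∃ p ∈ ps, k ∈ p.1 ∧ x ∈ p.2) := by
  intro ps
  induction ps with
  | nil => simp
  | cons p ps ih =>
    intro dr x
    rw [List.foldl_cons]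
    by_cases hk : k ∈ p.1
    · rw [if_pos hk, ih, PySem.Set.mem_union]  -- placeholder name check
      constructor
      · rintro ((h | h) | h)
        · exact Or.inl h
        · exact Or.inr ⟨p, List.mem_cons_self .., hk, h⟩
        · obtain ⟨q, hq, h1, h2⟩ := h
          exact Or.inr ⟨q, List.mem_cons_of_mem _ hq, h1, h2⟩
      · rintro (h | ⟨q, hq, h1, h2⟩)
        · exact Or.inl (Or.inl h)
        · rcases List.mem_cons.mp hq with rfl | hq
          · exact Or.inl (Or.inr h2)
          · exact Or.inr ⟨q, hq, h1, h2⟩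
    · rw [if_neg hk, ih]
      constructor
      · rintro (h | ⟨q, hq, h1, h2⟩)
        · exact Or.inl h
        · exact Or.inr ⟨q, List.mem_cons_of_mem _ hq, h1, h2⟩
      · rintro (h | ⟨q, hq, h1, h2⟩)
        · exact Or.inl h
        · rcases List.mem_cons.mp hq with rfl | hq
          · exact absurd h1 hk
          · exact Or.inr ⟨q, hq, h1, h2⟩

-- ---------- iv lemmas ----------
theorem iv_enum_aux (d : PySem.Dict String (List Int)) :
    ∀ (r : List String) (s : Int), 1 ≤ s → ∀ (m : List Int),
    (PySem.List.enumerate r s).foldl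
      (fun mini ik => if ik.1 == 0 then d.getD ik.2 []
                      else PySem.Set.inter mini (d.getD ik.2 [])) m
      = r.foldl (fun m k' => PySem.Set.inter m (pvS d k')) m := by
  intro r
  induction r with
  | nil => intros; rfl
  | cons k r ih =>
    intro s hs m
    rw [PySem.List.enumerate_cons, List.foldl_cons, List.foldl_cons]
    have h0 : (s == 0) = false := by simp; omega
    rw [h0]
    simp only [Bool.false_eq_true, if_false]
    exact ih (s + 1) (by omega) _

theorem iv_enumFold (d : PySem.Dict String (List Int)) (t : List String) (ht : t ≠ [])
    (m0 : List Int) :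
    (PySem.List.enumerate t).foldl
      (fun mini ik => if ik.1 == 0 then d.getD ik.2 []
                      else PySem.Set.inter mini (d.getD ik.2 [])) m0 = pvIv d t := by
  cases t with
  | nil => exact absurd rfl ht
  | cons k r =>
    show (PySem.List.enumerate (k :: r) 0).foldl _ m0 = _
    rw [PySem.List.enumerate_cons, List.foldl_cons]
    simp only [BEq.rfl, if_true]
    rw [iv_enum_aux d r (0 + 1) (by omega)]
    rfl

theorem iv_last (d : PySem.Dict String (List Int)) (t : List String) (h2 : 2 ≤ t.length) :
    pvIv d t = PySem.Set.inter (pvIv d t.dropLast) (pvS d (PySem.List.pyGetD t (-1) "")) := by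
  have hne : t ≠ [] := by intro h; simp [h] at h2
  rw [PySem.List.pyGetD_neg_one t "" hne]
  conv_lhs => rw [← List.dropLast_append_getLast hne]
  obtain ⟨k, rest, hd⟩ : ∃ k rest, t.dropLast = k :: rest := by
    cases hdl : t.dropLast with
    | nil =>
      have := @List.length_dropLast _ t
      rw [hdl] at this
      simp at this
      omega
    | cons k rest => exact ⟨k, rest, rfl⟩
  rw [hd]
  show pvIv d (k :: (rest ++ [t.getLast hne])) = _
  simp [pvIv, List.foldl_append]

-- ---------- dict fold lemmas ----------
theorem getD_foldl_pvIns_of_ne (d : PySem.Dict String (List Int)) :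
    ∀ (cs : List (List String)) (m : PySem.Dict (List String) (List Int)) (u : List String),
    (∀ a ∈ cs, a ≠ u) → (cs.foldl (pvIns d) m).getD u [] = m.getD u [] := by
  intro cs
  induction cs with
  | nil => intros; rfl
  | cons c cs ih =>
    intro m u h
    rw [List.foldl_cons, ih _ u (fun b hb => h b (List.mem_cons_of_mem _ hb))]
    exact PySem.Dict.getD_insert_of_ne _ _ _ ((h c (List.mem_cons_self ..)).symm)

theorem getD_foldl_insert_of_ne' {β K V : Type} [BEq K] [LawfulBEq K]
    (key : β → K) (g : β → V) :
    ∀ (l : List β) (m : PySem.Dict K V) (u : K) (v : V),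
    (∀ a ∈ l, key a ≠ u) →
    (l.foldl (fun m a => m.insert (key a) (g a)) m).getD u v = m.getD u v := by
  intro l
  induction l with
  | nil => intros; rfl
  | cons a l ih =>
    intro m u v h
    rw [List.foldl_cons, ih _ u v (fun b hb => h b (List.mem_cons_of_mem _ hb))]
    exact PySem.Dict.getD_insert_of_ne _ _ _ ((h a (List.mem_cons_self ..)).symm)

theorem getD_foldl_insert_mem {β K V : Type} [BEq K] [LawfulBEq K]
    (key : β → K) (g : β → V) :
    ∀ (l : List β) (m : PySem.Dict K V) (a0 : β) (v : V),
    a0 ∈ l → (l.map key).Nodup →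
    (l.foldl (fun m a => m.insert (key a) (g a)) m).getD (key a0) v = g a0 := by
  intro l
  induction l with
  | nil => intro m a0 v h _; simp at h
  | cons a l ih =>
    intro m a0 v hmem hnd
    have hnd' : (∀ x ∈ l, ¬key x = key a) ∧ (List.map key l).Nodup := by simpa using hnd
    rw [List.foldl_cons]
    rcases List.mem_cons.mp hmem with rfl | hmem'
    · have hnot : ∀ b ∈ l, key b ≠ key a0 := fun b hb he => hnd'.1 b hb he
      rw [getD_foldl_insert_of_ne' key g l _ _ v hnot]
      exact PySem.Dict.getD_insert_self _ _ _ _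
    · exact ih _ a0 v hmem' hnd'.2

theorem keys_pvTemp0 (d : PySem.Dict String (List Int)) (hnd : d.keys.Nodup) :
    (pvTemp0 d).keys = d.keys.map (fun k => [k]) := by
  unfold pvTemp0
  rw [PySem.Dict.keys_foldl_insert_key d.keys (fun k => [k])
    (fun m k => d.getD k []) PySem.Dict.empty]
  rw [PySem.Dict.keys_empty, PySem.Set.update_nil_left]
  exact PySem.Set.ofList_eq_self_of_nodup _ (hnd.map (fun a b h => by simpa using h))

theorem getD_pvTemp0 (d : PySem.Dict String (List Int)) (hnd : d.keys.Nodup)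
    (k : String) (hk : k ∈ d.keys) :
    (pvTemp0 d).getD [k] [] = d.getD k [] := by
  exact getD_foldl_insert_mem (fun k => [k]) (fun k => d.getD k []) d.keys
    PySem.Dict.empty k [] hk (hnd.map (fun a b h => by simpa using h))

-- ---------- memoized-intersection invariant ----------
theorem interUpTo_one (d : PySem.Dict String (List Int)) : pvInterUpTo d 1 = pvTemp0 d := by
  unfold pvInterUpTo
  rw [show (((1:Nat) : Int) + 1) = 2 by norm_num, PySem.List.pyRange_one_eq_nil (by omega)]
  rfl

theorem interUpTo_succ (d : PySem.Dict String (List Int)) (s : Nat) (hs : 1 ≤ s) :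
    pvInterUpTo d (s + 1)
      = (pyCombos d.keys (s + 1)).foldl (pvIns d) (pvInterUpTo d s) := by
  unfold pvInterUpTo
  rw [show (((s + 1 : Nat) : Int) + 1) = (((s : Nat) : Int) + 1) + 1 by push_cast; ring]
  rw [PySem.List.pyRange_one_succ_right (by omega), List.foldl_append]
  rw [List.foldl_cons, List.foldl_nil]
  have h2 : (((s : Nat) : Int) + 1).toNat = s + 1 := by omega
  rw [h2]

theorem pass_getD_aux (d : PySem.Dict String (List Int)) (s : Nat) (hs : 1 ≤ s) :
    ∀ (cs : List (List String)) (m : PySem.Dict (List String) (List Int)),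
    cs.Nodup → (∀ t ∈ cs, t ∈ pyCombos d.keys (s + 1)) →
    (∀ t ∈ cs, m.getD t.dropLast [] = pvIv d t.dropLast) →
    ∀ t ∈ cs, (cs.foldl (pvIns d) m).getD t [] = pvIv d t := by
  intro cs
  induction cs with
  | nil => simp
  | cons c cs ih =>
    intro m hnd hmem hprev t ht
    have hclen : c.length = s + 1 := pyCombos_length _ _ _ (hmem c (List.mem_cons_self ..))
    rw [List.foldl_cons]
    rcases List.mem_cons.mp ht with rfl | ht'
    · -- t = c : later inserts are at other tuples
      have hne : ∀ a ∈ cs, a ≠ t := by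
        intro a ha he
        exact (List.nodup_cons.mp hnd).1 (he ▸ ha)
      rw [getD_foldl_pvIns_of_ne d cs _ t hne]
      rw [show pvIns d m t = m.insert t (PySem.Set.inter
          (m.getD (PySem.List.slice t none (some (-1))) [])
          (d.getD (PySem.List.pyGetD t (-1) "") [])) from rfl]
      rw [PySem.Dict.getD_insert_self, PySem.List.slice_to_neg_one]
      rw [hprev t (List.mem_cons_self ..)]
      exact (iv_last d t (by omega)).symm
    · -- t in the tail
      apply ih _ (List.nodup_cons.mp hnd).2 (fun u hu => hmem u (List.mem_cons_of_mem _ hu))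
        _ t ht'
      intro u hu
      have hulen : u.length = s + 1 := pyCombos_length _ _ _ (hmem u (List.mem_cons_of_mem _ hu))
      have hdne : u.dropLast ≠ c := by
        intro he
        have h1 : u.dropLast.length = s := by
          have := @List.length_dropLast _ u; omega
        rw [he] at h1; omega
      rw [show pvIns d m c
          = m.insert c (PySem.Set.inter
              (m.getD (PySem.List.slice c none (some (-1))) [])
              (d.getD (PySem.List.pyGetD c (-1) "") [])) from rfl]
      rw [PySem.Dict.getD_insert_of_ne _ _ _ hdne]
      exact hprev u (List.mem_cons_of_mem _ hu)

theorem interUpTo_getD (d : PySem.Dict String (List Int)) (hnd : d.keys.Nodup) :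
    ∀ (s j : Nat), 1 ≤ j → j ≤ s → ∀ t ∈ pyCombos d.keys j,
    (pvInterUpTo d s).getD t [] = pvIv d t := by
  intro s
  induction s with
  | zero => intro j h1 h0; omega
  | succ s ih =>
    intro j hj1 hjs t ht
    by_cases hs0 : s = 0
    · subst hs0
      have hj : j = 1 := by omega
      subst hj
      rw [pyCombos_one] at ht
      obtain ⟨k, hk, rfl⟩ := List.mem_map.mp ht
      rw [interUpTo_one, getD_pvTemp0 d hnd k hk]
      rfl
    · have hs : 1 ≤ s := by omega
      rw [interUpTo_succ d s hs]
      rcases Nat.lt_or_ge j (s + 1) with hlt | hge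
      · have hne : ∀ a ∈ pyCombos d.keys (s + 1), a ≠ t := by
          intro a ha he
          have h1 := pyCombos_length _ _ _ ha
          have h2 := pyCombos_length _ _ _ ht
          rw [he] at h1; omega
        rw [getD_foldl_pvIns_of_ne d _ _ t hne]
        exact ih j hj1 (by omega) t ht
      · have hj : j = s + 1 := by omega
        subst hj
        exact pass_getD_aux d s hs (pyCombos d.keys (s + 1)) (pvInterUpTo d s)
          (pyCombos_nodup _ _ hnd) (fun u hu => hu)
          (fun u hu => ih s hs (le_refl s) u.dropLast (pyCombos_dropLast _ _ _ hu))
          t ht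

theorem inter_getD (d : PySem.Dict String (List Int)) (hnd : d.keys.Nodup)
    (t : List String) (j : Nat) (hj1 : 1 ≤ j) (hjn : j ≤ d.keys.length)
    (ht : t ∈ pyCombos d.keys j) :
    (pvInter d).getD t [] = pvIv d t :=
  interUpTo_getD d hnd d.keys.length j hj1 hjn t ht

-- ---------- port-shaped views ----------
def pvABody (d : PySem.Dict String (List Int)) (ao : Bool)
    (st : PySem.Set Int × PySem.Dict (List String) (List Int)) (jtup : Int × List String) :
    PySem.Set Int × PySem.Dict (List String) (List Int) :=
  let mini0 :=
    (PySem.List.enumerate jtup.2).foldl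
      (fun mini ik =>
        if ik.1 == 0 then d.getD ik.2 []
        else PySem.Set.inter mini (d.getD ik.2 [])) st.1
  let mini1 :=
    if ao then
      st.2.keys.foldl (fun m key => PySem.Set.diff m (st.2.getD key [])) mini0
    else mini0
  (mini1, st.2.insert jtup.2 mini1)

def pvCU0 (d : PySem.Dict String (List Int)) (ao : Bool) : PySem.Dict (List String) (List Int) :=
  (PySem.List.pyRange (d.size : Int) 1 (-1)).foldl (fun cu i =>
    ((PySem.List.enumerate (pyCombos d.keys i.toNat)).foldl (pvABody d ao)
      ((PySem.Set.empty : PySem.Set Int), cu)).2)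
    PySem.Dict.empty

def pvRS0 (d : PySem.Dict String (List Int)) (ao : Bool) :
    PySem.Dict (List String) (List Int) × PySem.Set Int :=
  (PySem.List.pyRange ((d.keys.length : Int)) 1 (-1)).foldl (fun rs size =>
    (pyCombos d.keys size.toNat).foldl (pvStepB d ao) rs)
    (PySem.Dict.empty, (PySem.Set.empty : PySem.Set Int))

def pvACore (d : PySem.Dict String (List Int)) (cu : PySem.Dict (List String) (List Int)) :
    List (List String × List Int) :=
  (cu.update
    (cu.keys.foldl (fun t tup =>
      tup.foldl (fun t key =>
        t.insert [key] (PySem.Set.diff (t.getD [key] []) (cu.getD tup []))) t)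
      (pvTemp0 d)).items).items

def pvBCore (d : PySem.Dict String (List Int)) (r0 : PySem.Dict (List String) (List Int)) :
    List (List String × List Int) :=
  (d.keys.foldl (fun r k =>
    let drop := r.items.foldl (fun dr p =>
      if k ∈ p.1 then PySem.Set.union dr p.2 else dr) (PySem.Set.empty : PySem.Set Int)
    r.insert [k] (PySem.Set.diff (d.getD k []) drop)) r0).items

theorem a_rfl (sets : List (String × List Int)) (ao : Bool) :
    comboFinder sets ao
      = pvACore (PySem.Dict.ofList (sets.map (fun p => (p.1, PySem.Set.ofList p.2))))
          (pvCU0 (PySem.Dict.ofList (sets.map (fun p => (p.1, PySem.Set.ofList p.2)))) ao) := rfl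

theorem b_rfl (sets : List (String × List Int)) (ao : Bool) :
    comboFinder_alt sets ao
      = pvBCore (PySem.Dict.ofList (sets.map (fun p => (p.1, PySem.Set.ofList p.2))))
          ((pvRS0 (PySem.Dict.ofList (sets.map (fun p => (p.1, PySem.Set.ofList p.2)))) ao).1) := rfl

-- ---------- pvT facts ----------
theorem mem_pvT (d : PySem.Dict String (List Int)) :
    ∀ t ∈ pvT d, 2 ≤ t.length ∧ t.length ≤ d.keys.length ∧ t ∈ pyCombos d.keys t.length := by
  intro t ht
  unfold pvT at ht
  obtain ⟨i, hi, hti⟩ := List.mem_flatMap.mp ht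
  obtain ⟨hi1, hi2⟩ := (PySem.List.mem_pyRange_neg_one).mp hi
  have hlen := pyCombos_length _ _ _ hti
  refine ⟨by omega, by omega, ?_⟩
  rw [hlen]
  exact (by omega : i.toNat = t.length) ▸ hti

theorem nodup_pvT (d : PySem.Dict String (List Int)) (hnd : d.keys.Nodup) :
    (pvT d).Nodup := by
  unfold pvT
  rw [List.nodup_flatMap]
  constructor
  · intro i _; exact pyCombos_nodup _ _ hnd
  · have hnodupR : (PySem.List.pyRange ((d.keys.length : Int)) 1 (-1)).Nodup := by
      rw [PySem.List.pyRange_neg_one_eq_reverse]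
      exact List.nodup_reverse.mpr (PySem.List.nodup_pyRange_one ..)
    refine List.Pairwise.imp_of_mem ?_ hnodupR
    intro i j hi hj hne t hti htj
    have l1 := pyCombos_length _ _ _ hti
    have l2 := pyCombos_length _ _ _ htj
    have hi' := (PySem.List.mem_pyRange_neg_one).mp hi
    have hj' := (PySem.List.mem_pyRange_neg_one).mp hj
    exact hne (by omega)

theorem T_inter (d : PySem.Dict String (List Int)) (hnd : d.keys.Nodup) :
    ∀ t ∈ pvT d, (pvInter d).getD t [] = pvIv d t := by
  intro t ht
  obtain ⟨h2, hn, hmem⟩ := mem_pvT d t ht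
  exact inter_getD d hnd t t.length (by omega) hn hmem

-- ---------- main-phase agreement ----------
theorem main_agree (d : PySem.Dict String (List Int)) (ao : Bool) :
    ∀ (ts : List (List String)) (cu : PySem.Dict (List String) (List Int))
      (seen : PySem.Set Int),
    (∀ t ∈ ts, (pvInter d).getD t [] = pvIv d t) →
    (∀ t ∈ ts, t ∉ cu.keys) →
    ts.Nodup →
    (ao = true → ∀ x : Int, x ∈ seen ↔ ∃ k ∈ cu.keys, x ∈ cu.getD k []) →
    ts.foldl (pvStepA d ao) cu = (ts.foldl (pvStepB d ao) (cu, seen)).1 := by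
  intro ts
  induction ts with
  | nil => intros; rfl
  | cons t ts ih =>
    intro cu seen hiv hfresh hnd hseen
    rw [List.foldl_cons, List.foldl_cons]
    have hivt := hiv t (List.mem_cons_self ..)
    have htf : t ∉ cu.keys := hfresh t (List.mem_cons_self ..)
    cases ao with
    | false =>
      have hA : pvStepA d false cu t = cu.insert t (pvIv d t) := by
        simp [pvStepA, pvAfter]
      have hB : pvStepB d false (cu, seen) t = (cu.insert t (pvIv d t), seen) := by
        simp [pvStepB, hivt]
      rw [hA, hB]
      refine ih (cu.insert t (pvIv d t)) seen
        (fun u hu => hiv u (List.mem_cons_of_mem _ hu)) ?_ (List.nodup_cons.mp hnd).2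
        (by intro h; cases h)
      intro u hu hmem
      rcases (PySem.Dict.mem_keys_insert _ _ _ _).mp hmem with rfl | hmem'
      · exact (List.nodup_cons.mp hnd).1 hu
      · exact hfresh u (List.mem_cons_of_mem _ hu) hmem'
    | true =>
      have hchain : pvAfter true cu (pvIv d t) = PySem.Set.diff (pvIv d t) seen := by
        unfold pvAfter
        rw [if_pos rfl]
        exact chain_diff_eq_diff (fun k => cu.getD k []) cu.keys (pvIv d t) seen (hseen rfl)
      set v := PySem.Set.diff (pvIv d t) seen with hv
      have hA : pvStepA d true cu t = cu.insert t v := by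
        unfold pvStepA
        rw [hchain]
      have hB : pvStepB d true (cu, seen) t = (cu.insert t v, PySem.Set.union seen v) := by
        simp [pvStepB, hivt, hv]
      rw [hA, hB]
      refine ih (cu.insert t v) (PySem.Set.union seen v)
        (fun u hu => hiv u (List.mem_cons_of_mem _ hu)) ?_ (List.nodup_cons.mp hnd).2 ?_
      · intro u hu hmem
        rcases (PySem.Dict.mem_keys_insert _ _ _ _).mp hmem with rfl | hmem'
        · exact (List.nodup_cons.mp hnd).1 hu
        · exact hfresh u (List.mem_cons_of_mem _ hu) hmem'
      · intro _ x
        rw [PySem.Set.mem_union]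
        constructor
        · rintro (hx | hx)
          · obtain ⟨k, hk, hxk⟩ := ((hseen rfl) x).mp hx
            refine ⟨k, (PySem.Dict.mem_keys_insert _ _ _ _).mpr (Or.inr hk), ?_⟩
            rw [PySem.Dict.getD_insert_of_ne _ _ _ (fun he => htf (by rw [← he]; exact hk))]
            exact hxk
          · refine ⟨t, (PySem.Dict.mem_keys_insert _ _ _ _).mpr (Or.inl rfl), ?_⟩
            rw [PySem.Dict.getD_insert_self]
            exact hx
        · rintro ⟨k, hk, hxk⟩
          rcases (PySem.Dict.mem_keys_insert _ _ _ _).mp hk with rfl | hk'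
          · rw [PySem.Dict.getD_insert_self] at hxk
            exact Or.inr hxk
          · rw [PySem.Dict.getD_insert_of_ne _ _ _ (fun he => htf (by rw [← he]; exact hk'))] at hxk
            exact Or.inl (((hseen rfl) x).mpr ⟨k, hk', hxk⟩)

-- ---------- reduction of the port loops ----------
theorem pvABody_eval (d : PySem.Dict String (List Int)) (ao : Bool)
    (st : PySem.Set Int × PySem.Dict (List String) (List Int)) (s : Int) (c : List String)
    (hc : c ≠ []) :
    pvABody d ao st (s, c)
      = (pvAfter ao st.2 (pvIv d c), st.2.insert c (pvAfter ao st.2 (pvIv d c))) := by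
  unfold pvABody pvAfter
  rw [iv_enumFold d c hc st.1]

theorem enum_elim (d : PySem.Dict String (List Int)) (ao : Bool) :
    ∀ (cs : List (List String)), (∀ t ∈ cs, t ≠ []) →
    ∀ (m0 : PySem.Set Int) (cu : PySem.Dict (List String) (List Int)) (s : Int),
    ((PySem.List.enumerate cs s).foldl (pvABody d ao) (m0, cu)).2
      = cs.foldl (pvStepA d ao) cu := by
  intro cs
  induction cs with
  | nil => intros; rfl
  | cons c cs ih =>
    intro hne m0 cu s
    rw [PySem.List.enumerate_cons, List.foldl_cons, List.foldl_cons]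
    rw [pvABody_eval d ao (m0, cu) s c (hne c (List.mem_cons_self ..))]
    rw [ih (fun t ht => hne t (List.mem_cons_of_mem _ ht)) _ _ (s + 1)]
    rfl

theorem cu0_eq (d : PySem.Dict String (List Int)) (ao : Bool) :
    pvCU0 d ao = pvCU d ao := by
  unfold pvCU0 pvCU pvT
  rw [show ((d.size : Int)) = ((d.keys.length : Int)) by
    simp [PySem.Dict.size, PySem.Dict.keys]]
  rw [List.foldl_flatMap]
  apply PySem.List.foldl_congr_mem
  intro cu i hi
  have hne : ∀ t ∈ pyCombos d.keys i.toNat, t ≠ [] := by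
    intro t ht he
    have := pyCombos_length _ _ _ ht
    have hi' := (PySem.List.mem_pyRange_neg_one).mp hi
    rw [he] at this
    simp at this
    omega
  exact enum_elim d ao _ hne PySem.Set.empty cu 0

theorem rs0_eq (d : PySem.Dict String (List Int)) (ao : Bool) :
    pvRS0 d ao = pvRS d ao := by
  unfold pvRS0 pvRS pvT
  rw [List.foldl_flatMap]

theorem keys_pvCU (d : PySem.Dict String (List Int)) (hnd : d.keys.Nodup) (ao : Bool) :
    (pvCU d ao).keys = pvT d := by
  unfold pvCU
  rw [show pvStepA d ao = (fun cu tup => cu.insert tup (pvAfter ao cu (pvIv d tup))) from rfl]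
  rw [PySem.Dict.keys_foldl_insert]
  rw [PySem.Dict.keys_empty, PySem.Set.update_nil_left]
  exact PySem.Set.ofList_eq_self_of_nodup _ (nodup_pvT d hnd)

-- ---------- leftover phase ----------
def pvDropCU (cu : PySem.Dict (List String) (List Int)) (k : String) : PySem.Set Int :=
  cu.items.foldl (fun dr p => if k ∈ p.1 then PySem.Set.union dr p.2 else dr)
    (PySem.Set.empty : PySem.Set Int)

def pvVB (d : PySem.Dict String (List Int)) (cu : PySem.Dict (List String) (List Int))
    (k : String) : List Int :=
  PySem.Set.diff (d.getD k []) (pvDropCU cu k)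

def pvChainK (d : PySem.Dict String (List Int)) (cu : PySem.Dict (List String) (List Int))
    (k : String) : List Int :=
  (cu.keys.filter (fun tup => decide (k ∈ tup))).foldl
    (fun m tup => PySem.Set.diff m (cu.getD tup [])) (d.getD k [])

def pvStep3 (d : PySem.Dict String (List Int)) (r : PySem.Dict (List String) (List Int))
    (k : String) : PySem.Dict (List String) (List Int) :=
  let drop := r.items.foldl (fun dr p =>
    if k ∈ p.1 then PySem.Set.union dr p.2 else dr) (PySem.Set.empty : PySem.Set Int)
  r.insert [k] (PySem.Set.diff (d.getD k []) drop)

theorem inner_tup (d : PySem.Dict String (List Int)) (v : List Int) :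
    ∀ (tup : List String) (t : PySem.Dict (List String) (List Int)),
    tup.Nodup → (∀ key ∈ tup, key ∈ d.keys) → t.keys = d.keys.map (fun k => [k]) →
    ((tup.foldl (fun t key => t.insert [key] (PySem.Set.diff (t.getD [key] []) v)) t).keys
        = t.keys
     ∧ ∀ k : String,
        (k ∈ tup →
          (tup.foldl (fun t key => t.insert [key] (PySem.Set.diff (t.getD [key] []) v)) t).getD [k] []
            = PySem.Set.diff (t.getD [k] []) v)
      ∧ (k ∉ tup →
          (tup.foldl (fun t key => t.insert [key] (PySem.Set.diff (t.getD [key] []) v)) t).getD [k] []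
            = t.getD [k] [])) := by
  intro tup
  induction tup with
  | nil =>
    intro t _ _ _
    exact ⟨rfl, fun k => ⟨fun h => by simp at h, fun _ => rfl⟩⟩
  | cons key rest ih =>
    intro t hnd hmem hkeys
    have hcont : t.contains [key] = true := by
      rw [PySem.Dict.contains_iff_mem_keys, hkeys]
      exact List.mem_map_of_mem (hmem key (List.mem_cons_self ..))
    have hk1 : (t.insert [key] (PySem.Set.diff (t.getD [key] []) v)).keys = t.keys :=
      PySem.Dict.keys_insert_of_contains _ _ hcont
    obtain ⟨ihk, ihg⟩ := ih (t.insert [key] (PySem.Set.diff (t.getD [key] []) v))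
      (List.nodup_cons.mp hnd).2
      (fun k hk => hmem k (List.mem_cons_of_mem _ hk)) (hk1.trans hkeys)
    rw [List.foldl_cons]
    refine ⟨ihk.trans hk1, ?_⟩
    intro k
    constructor
    · intro hk
      rcases List.mem_cons.mp hk with rfl | hkr
      · have hknr : k ∉ rest := (List.nodup_cons.mp hnd).1
        rw [(ihg k).2 hknr, PySem.Dict.getD_insert_self]
      · have hkne : k ≠ key := by
          intro he
          exact (List.nodup_cons.mp hnd).1 (he ▸ hkr)
        have hne : ([k] : List String) ≠ [key] := by
          intro he; exact hkne (by injection he)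
        rw [(ihg k).1 hkr, PySem.Dict.getD_insert_of_ne _ _ _ hne]
    · intro hk
      have hkne : k ≠ key := fun he => hk (he ▸ List.mem_cons_self ..)
      have hkr : k ∉ rest := fun h => hk (List.mem_cons_of_mem _ h)
      have hne : ([k] : List String) ≠ [key] := by
        intro he; exact hkne (by injection he)
      rw [(ihg k).2 hkr, PySem.Dict.getD_insert_of_ne _ _ _ hne]

theorem tempFold (d : PySem.Dict String (List Int)) (cu : PySem.Dict (List String) (List Int)) :
    ∀ (tups : List (List String)) (t0 : PySem.Dict (List String) (List Int)),
    (∀ tup ∈ tups, tup.Nodup ∧ ∀ key ∈ tup, key ∈ d.keys) →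
    t0.keys = d.keys.map (fun k => [k]) →
    ((tups.foldl (fun t tup => tup.foldl (fun t key =>
        t.insert [key] (PySem.Set.diff (t.getD [key] []) (cu.getD tup []))) t) t0).keys
      = d.keys.map (fun k => [k])
     ∧ ∀ k ∈ d.keys,
      (tups.foldl (fun t tup => tup.foldl (fun t key =>
        t.insert [key] (PySem.Set.diff (t.getD [key] []) (cu.getD tup []))) t) t0).getD [k] []
        = (tups.filter (fun tup => decide (k ∈ tup))).foldl
            (fun m tup => PySem.Set.diff m (cu.getD tup [])) (t0.getD [k] [])) := by
  intro tups
  induction tups with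
  | nil =>
    intro t0 _ hkeys
    exact ⟨hkeys, fun k _ => rfl⟩
  | cons tup tups ih =>
    intro t0 hts hkeys
    have hhd := hts tup (List.mem_cons_self ..)
    obtain ⟨h1k, h1g⟩ := inner_tup d (cu.getD tup []) tup t0 hhd.1 hhd.2 hkeys
    obtain ⟨ihk, ihg⟩ := ih
      (tup.foldl (fun t key =>
        t.insert [key] (PySem.Set.diff (t.getD [key] []) (cu.getD tup []))) t0)
      (fun u hu => hts u (List.mem_cons_of_mem _ hu)) (h1k.trans hkeys)
    rw [List.foldl_cons]
    refine ⟨ihk, ?_⟩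
    intro k hk
    rw [ihg k hk]
    by_cases hkt : k ∈ tup
    · rw [List.filter_cons_of_pos (by simpa using hkt), List.foldl_cons]
      rw [(h1g k).1 hkt]
    · rw [List.filter_cons_of_neg (by simpa using hkt)]
      rw [(h1g k).2 hkt]

theorem a_items (d : PySem.Dict String (List Int)) (hnd : d.keys.Nodup)
    (cu : PySem.Dict (List String) (List Int))
    (hlen : ∀ t ∈ cu.keys, 2 ≤ t.length)
    (hsub : ∀ tup ∈ cu.keys, tup.Nodup ∧ ∀ key ∈ tup, key ∈ d.keys) :
    pvACore d cu = cu.items ++ d.keys.map (fun k => ([k], pvChainK d cu k)) := by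
  unfold pvACore
  obtain ⟨hk2, hg2⟩ := tempFold d cu cu.keys (pvTemp0 d) hsub (keys_pvTemp0 d hnd)
  set temp2 := cu.keys.foldl (fun t tup => tup.foldl (fun t key =>
    t.insert [key] (PySem.Set.diff (t.getD [key] []) (cu.getD tup []))) t) (pvTemp0 d) with htemp2
  have hknd2 : temp2.keys.Nodup := by
    rw [hk2]
    exact hnd.map (fun a b h => by simpa using h)
  have hfresh : ∀ p ∈ temp2.items, cu.contains p.1 = false := by
    intro p hp
    have hpk : p.1 ∈ temp2.keys := PySem.Dict.mem_keys_of_mem_items _ hp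
    rw [hk2] at hpk
    obtain ⟨k, _, hkp⟩ := List.mem_map.mp hpk
    have : p.1 ∉ cu.keys := by
      intro hmem
      have := hlen p.1 hmem
      rw [← hkp] at this
      simp at this
    exact Bool.eq_false_iff.mpr (fun hc => this ((PySem.Dict.contains_iff_mem_keys cu p.1).mp hc))
  have hfstnd : (temp2.items.map Prod.fst).Nodup := hknd2
  rw [show PySem.Dict.update cu temp2.items
      = temp2.items.foldl (fun acc p => acc.insert p.1 p.2) cu from rfl]
  rw [PySem.Dict.items_foldl_insert_fresh temp2.items Prod.fst Prod.snd cu hfresh hfstnd]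
  congr 1
  calc temp2.items.map (fun a => (Prod.fst a, Prod.snd a))
      = temp2.items := by simp
    _ = temp2.keys.map (fun t => (t, temp2.getD t [])) :=
        PySem.Dict.items_eq_map_keys temp2 hknd2 []
    _ = (d.keys.map (fun k => [k])).map (fun t => (t, temp2.getD t [])) := by rw [hk2]
    _ = d.keys.map (fun k => ([k], temp2.getD [k] [])) := by rw [List.map_map]; rfl
    _ = d.keys.map (fun k => ([k], pvChainK d cu k)) := by
        apply List.map_congr_left
        intro k hk
        rw [hg2 k hk, getD_pvTemp0 d hnd k hk]
        rfl

theorem bFold (d : PySem.Dict String (List Int)) (cu : PySem.Dict (List String) (List Int))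
    (hlen : ∀ t ∈ cu.keys, 2 ≤ t.length) :
    ∀ (ks done : List String) (vfun : String → List Int)
      (r : PySem.Dict (List String) (List Int)),
    (done ++ ks).Nodup →
    r.items = cu.items ++ done.map (fun k => ([k], vfun k)) →
    (ks.foldl (pvStep3 d) r).items
      = cu.items ++ (done.map (fun k => ([k], vfun k)) ++ ks.map (fun k => ([k], pvVB d cu k))) := by
  intro ks
  induction ks with
  | nil =>
    intro done vfun r _ hr
    simpa using hr
  | cons k ks ih =>
    intro done vfun r hnd hr
    rw [List.foldl_cons]
    have hkdone : k ∉ done := by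
      have hdis := List.disjoint_of_nodup_append hnd
      intro h
      exact hdis h (List.mem_cons_self ..)
    have hrkeys : r.keys = cu.keys ++ done.map (fun k' => [k']) := by
      simp only [PySem.Dict.keys, hr, List.map_append, List.map_map]
      rfl
    have hcont : r.contains [k] = false := by
      apply Bool.eq_false_iff.mpr
      intro hc
      have hm := (PySem.Dict.contains_iff_mem_keys r [k]).mp hc
      rw [hrkeys] at hm
      rcases List.mem_append.mp hm with hm | hm
      · have := hlen _ hm; simp at this
      · obtain ⟨k', hk', he⟩ := List.mem_map.mp hm
        have hke : k' = k := by injection he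
        exact hkdone (hke ▸ hk')
    have hdropmem : ∀ x : Int,
        (x ∈ r.items.foldl (fun dr p => if k ∈ p.1 then PySem.Set.union dr p.2 else dr)
          (PySem.Set.empty : PySem.Set Int))
          ↔ x ∈ pvDropCU cu k := by
      intro x
      rw [hr, List.foldl_append, mem_foldl_union_if]
      constructor
      · rintro (hx | ⟨p, hp, h1, h2⟩)
        · exact hx
        · obtain ⟨k', hk', he⟩ := List.mem_map.mp hp
          rw [← he] at h1
          simp at h1
          exact absurd (h1 ▸ hk') hkdone
      · intro hx
        exact Or.inl hx
    have hval : PySem.Set.diff (d.getD k [])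
        (r.items.foldl (fun dr p => if k ∈ p.1 then PySem.Set.union dr p.2 else dr)
          (PySem.Set.empty : PySem.Set Int))
        = pvVB d cu k := diff_congr_mem _ _ _ hdropmem
    have hitems : (pvStep3 d r k).items = r.items ++ [([k], pvVB d cu k)] := by
      unfold pvStep3
      rw [PySem.Dict.items_insert_of_not_contains r _ hcont, hval]
    have happ : (pvStep3 d r k).items
        = cu.items ++ (done ++ [k]).map
            (fun k' => ([k'], if k' = k then pvVB d cu k else vfun k')) := by
      rw [hitems, hr, List.map_append, List.append_assoc]
      congr 1
      congr 1
      · apply List.map_congr_left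
        intro k' hk'
        have hne : k' ≠ k := fun he => hkdone (he ▸ hk')
        simp [hne]
      · simp
    have hnd' : ((done ++ [k]) ++ ks).Nodup := by
      rw [← List.append_cons]
      exact hnd
    rw [ih (done ++ [k]) (fun k' => if k' = k then pvVB d cu k else vfun k')
      (pvStep3 d r k) hnd' happ]
    congr 1
    rw [List.map_append, List.map_cons, List.append_assoc]
    congr 1
    · apply List.map_congr_left
      intro k' hk'
      have hne : k' ≠ k := fun he => hkdone (he ▸ hk')
      simp [hne]
    · simp

theorem chainK_eq (d : PySem.Dict String (List Int)) (cu : PySem.Dict (List String) (List Int))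
    (hknd : cu.keys.Nodup) (k : String) :
    pvChainK d cu k = pvVB d cu k := by
  unfold pvChainK pvVB
  apply chain_diff_eq_diff
  intro x
  unfold pvDropCU
  rw [mem_foldl_union_if]
  constructor
  · rintro (hx | ⟨p, hp, h1, h2⟩)
    · simp at hx
    · have hcukey : p.1 ∈ cu.keys := PySem.Dict.mem_keys_of_mem_items _ hp
      have hget : cu.getD p.1 [] = p.2 := by
        have hp' : (p.1, p.2) ∈ cu.items := by simpa using hp
        exact PySem.Dict.getD_of_mem_items _ hp' hknd []
      refine ⟨p.1, List.mem_filter.mpr ⟨hcukey, by simpa using h1⟩, ?_⟩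
      rw [hget]
      exact h2
  · rintro ⟨tup, htup, hx⟩
    obtain ⟨h1, h2⟩ := List.mem_filter.mp htup
    right
    refine ⟨(tup, cu.getD tup []), ?_, by simpa using h2, hx⟩
    rw [PySem.Dict.items_eq_map_keys cu hknd []]
    exact List.mem_map_of_mem h1

theorem master (d : PySem.Dict String (List Int)) (hnd : d.keys.Nodup) (ao : Bool) :
    pvACore d (pvCU0 d ao) = pvBCore d ((pvRS0 d ao).1) := by
  rw [cu0_eq, rs0_eq]
  have hcu : pvCU d ao = (pvRS d ao).1 := by
    unfold pvCU pvRS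
    refine main_agree d ao (pvT d) PySem.Dict.empty PySem.Set.empty (T_inter d hnd)
      ?_ (nodup_pvT d hnd) ?_
    · intro t _
      rw [PySem.Dict.keys_empty]
      simp
    · intro _ x
      rw [PySem.Dict.keys_empty]
      simp [PySem.Set.empty]
  rw [← hcu]
  have hkeys := keys_pvCU d hnd ao
  have hknd : (pvCU d ao).keys.Nodup := by rw [hkeys]; exact nodup_pvT d hnd
  have hlen : ∀ t ∈ (pvCU d ao).keys, 2 ≤ t.length := by
    rw [hkeys]
    intro t ht
    exact (mem_pvT d t ht).1
  have hsub : ∀ tup ∈ (pvCU d ao).keys, tup.Nodup ∧ ∀ key ∈ tup, key ∈ d.keys := by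
    rw [hkeys]
    intro tup ht
    have hsl := pyCombos_sublist _ _ _ (mem_pvT d tup ht).2.2
    exact ⟨hsl.nodup hnd, fun key hk => hsl.subset hk⟩
  rw [a_items d hnd (pvCU d ao) hlen hsub]
  have hb := bFold d (pvCU d ao) hlen d.keys [] (fun _ => []) (pvCU d ao)
    (by simpa using hnd) (by simp)
  rw [show pvBCore d (pvCU d ao) = (d.keys.foldl (pvStep3 d) (pvCU d ao)).items from rfl, hb]
  simp only [List.map_nil, List.nil_append]
  congr 1
  apply List.map_congr_left
  intro k _
  rw [chainK_eq d (pvCU d ao) hknd k]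


-- ===== VERDICT (by name: the statement is the Claim_ definition above) =====
theorem comboFinder_spec : Claim_equal_comboFinder := by
  intro sets ao _
  show comboFinder sets ao = comboFinder_alt sets ao
  rw [a_rfl, b_rfl]
  exact master _ (PySem.Dict.nodup_keys_ofList _) ao
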